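-- pv_equiv track=rewrite | github.com/hghyhghy/Codechef-Coding-Ninja | Desktop/DSA/T25/1.py | removal_of_the_alphabet
-- ===== SOURCE A (Python) =====
-- def removal_of_the_alphabet(string):
--
--     alphabets='123456789'
--
--     revised_string=""
--
--     for char in string:
--
--         if char in alphabets:
--
--             break
--
--         else:
--
--             revised_string += char
--
--
--     return revised_string
-- ===== SOURCE B (Python) =====
-- import re
--
-- def removal_of_the_alphabet(string):
--     # maximal leading run of characters that are not digits 1-9
--     return re.match(r'[^1-9]*', string).group()
-- ===== Notes on version B (the rewrite author's own statement) =====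
-- stated objective: idiomatic
-- what changed: B locates the maximal leading run of non-1-9 characters with a single regex match and returns it at once, instead of A's character-by-character loop that accumulates a string and breaks on the first digit 1-9.
import Mathlib
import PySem

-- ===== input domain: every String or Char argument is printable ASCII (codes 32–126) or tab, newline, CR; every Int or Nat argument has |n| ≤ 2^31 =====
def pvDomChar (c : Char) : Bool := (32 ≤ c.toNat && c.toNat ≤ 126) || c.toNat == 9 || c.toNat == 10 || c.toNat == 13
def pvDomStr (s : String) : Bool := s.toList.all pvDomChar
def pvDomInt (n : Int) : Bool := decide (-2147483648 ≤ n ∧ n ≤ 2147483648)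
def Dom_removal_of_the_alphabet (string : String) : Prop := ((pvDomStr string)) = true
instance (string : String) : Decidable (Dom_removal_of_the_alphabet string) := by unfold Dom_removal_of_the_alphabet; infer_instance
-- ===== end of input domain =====

-- B: one regex match of the maximal leading run of non-1-9 characters, instead of A's
-- accumulate-and-break loop; objective: idiomatic.
-- ===== PORT A =====
-- for char in string: if char in '123456789': break else revised_string += char
def pvALoop : List Char → String → String
  | [], acc => acc
  | c :: rest, acc =>
    if c ∈ "123456789".toList then acc else pvALoop rest (acc.push c)

def removal_of_the_alphabet (string : String) : String :=
  pvALoop string.toList ""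

-- ===== PORT B =====
-- re.match(r'[^1-9]*', string).group(): the maximal leading run of chars outside the
-- character class 1-9, i.e. takeWhile on the range test.
def removal_of_the_alphabet_alt (string : String) : String :=
  String.ofList (string.toList.takeWhile (fun c => !('1' ≤ c && c ≤ '9')))

-- ===== PRECONDITION & SPEC =====
def Spec_removal_of_the_alphabet (string : String) (out : String) : Prop := out = removal_of_the_alphabet_alt string
instance (string : String) (out : String) : Decidable (Spec_removal_of_the_alphabet string out) := by unfold Spec_removal_of_the_alphabet; infer_instance

-- ===== CLAIM (what is proved, stated in full; the proofs are below) =====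
def Claim_equal_removal_of_the_alphabet : Prop := ∀ (string : String), Dom_removal_of_the_alphabet string → Spec_removal_of_the_alphabet string (removal_of_the_alphabet string)

-- ===== LEMMAS AND PROOFS =====

lemma pv_char_eq (c : Char) (d : Char) (h : c.toNat = d.toNat) : c = d :=
  Char.ext (UInt32.toNat_inj.mp h)


lemma pv_mem_iff (c : Char) : (c ∈ "123456789".toList) ↔ ('1' ≤ c && c ≤ '9') = true := by
  have hm : c ∈ "123456789".toList ↔ 49 ≤ c.toNat ∧ c.toNat ≤ 57 := by
    show c ∈ ['1','2','3','4','5','6','7','8','9'] ↔ _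
    simp only [List.mem_cons, List.not_mem_nil, or_false]
    constructor
    · rintro (rfl|rfl|rfl|rfl|rfl|rfl|rfl|rfl|rfl) <;> decide
    · rintro ⟨h1, h2⟩
      interval_cases h : c.toNat <;>
        first
        | (exact Or.inl (pv_char_eq c '1' h))
        | (exact Or.inr (Or.inl (pv_char_eq c '2' h)))
        | (exact Or.inr (Or.inr (Or.inl (pv_char_eq c '3' h))))
        | (exact Or.inr (Or.inr (Or.inr (Or.inl (pv_char_eq c '4' h)))))
        | (exact Or.inr (Or.inr (Or.inr (Or.inr (Or.inl (pv_char_eq c '5' h))))))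
        | (exact Or.inr (Or.inr (Or.inr (Or.inr (Or.inr (Or.inl (pv_char_eq c '6' h)))))))
        | (exact Or.inr (Or.inr (Or.inr (Or.inr (Or.inr (Or.inr (Or.inl (pv_char_eq c '7' h))))))))
        | (exact Or.inr (Or.inr (Or.inr (Or.inr (Or.inr (Or.inr (Or.inr (Or.inl (pv_char_eq c '8' h)))))))))
        | (exact Or.inr (Or.inr (Or.inr (Or.inr (Or.inr (Or.inr (Or.inr (Or.inr (pv_char_eq c '9' h)))))))))
  rw [hm]
  have h1 : (('1':Char) ≤ c) = (49 ≤ c.toNat) := by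
    simp only [Char.le_def, UInt32.le_iff_toNat_le]; rfl
  have h9 : ((c:Char) ≤ '9') = (c.toNat ≤ 57) := by
    simp only [Char.le_def, UInt32.le_iff_toNat_le]; rfl
  simp [h1, h9]
lemma pvALoop_eq (l : List Char) (acc : String) :
    pvALoop l acc = String.ofList (acc.toList ++ l.takeWhile (fun c => !('1' ≤ c && c ≤ '9'))) := by
  induction l generalizing acc with
  | nil =>
    show acc = String.ofList (acc.toList ++ [])
    rw [List.append_nil, String.ofList_toList]
  | cons c rest ih =>
    show (if c ∈ "123456789".toList then acc else pvALoop rest (acc.push c)) = _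
    by_cases h : c ∈ "123456789".toList
    · have hb := (pv_mem_iff c).mp h
      rw [if_pos h, List.takeWhile_cons, hb]
      show acc = String.ofList (acc.toList ++ [])
      rw [List.append_nil, String.ofList_toList]
    · have hb : ('1' ≤ c && c ≤ '9') = false := by
        rcases Bool.eq_false_or_eq_true ('1' ≤ c && c ≤ '9') with ht | hf
        · exact absurd ((pv_mem_iff c).mpr ht) h
        · exact hf
      rw [if_neg h, ih, List.takeWhile_cons, hb]
      show String.ofList ((acc.push c).toList ++ _) = String.ofList (acc.toList ++ c :: _)
      rw [String.toList_push, List.append_assoc, List.singleton_append]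

-- ===== VERDICT (by name: the statement is the Claim_ definition above) =====
theorem removal_of_the_alphabet_spec : Claim_equal_removal_of_the_alphabet := by
  intro string _
  show removal_of_the_alphabet string = removal_of_the_alphabet_alt string
  simp [removal_of_the_alphabet, removal_of_the_alphabet_alt, pvALoop_eq]
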